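-- pv_equiv track=rewrite | github.com/luca-watson/lwatson3-toc-fa24-project01 | dumbpartite_lwatson3.py | find_edge_combinations
-- ===== SOURCE A (Python) =====
-- def find_edge_combinations(edges):
--     def backtrack(start, cur_combo):
--         #if we've reached the end, add result
--         if start >= len(edges):
--             results.append(cur_combo[:])
--             return
--
--         #for the rest of the possible edges, add if both vertices are free
--         for i in range(start, len(edges)):
--             u, v = edges[i]
--             if u not in used and v not in used:
--
--                 used.add(u)
--                 used.add(v)
--                 cur_combo.append(edges[i])
--
--                 # move to next edge recursively
--                 backtrack(i + 1, cur_combo)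
--
--                 # backtrack
--                 cur_combo.pop()
--                 used.remove(u)
--                 used.remove(v)
--
--     results = []
--     used = set()
--     backtrack(0, [])
--     return results
-- ===== SOURCE B (Python) =====
-- def find_edge_combinations(edges):
--     n = len(edges)
--     results = []
--     stack = [(0, [], set())]
--     while stack:
--         start, combo, used = stack.pop()
--         if start >= n:
--             results.append(combo)
--             continue
--         children = [(i + 1, combo + [edges[i]], used | {edges[i][0], edges[i][1]})
--                     for i in range(start, n)
--                     if edges[i][0] not in used and edges[i][1] not in used]
--         stack.extend(reversed(children))
--     return results
-- ===== Notes on version B (the rewrite author's own statement) =====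
-- stated objective: alternative
-- what changed: Replaces the mutating recursive backtracking (shared used-set/combo with push/pop undo) by an explicit stack-based iterative DFS with immutable per-frame state (start, combo, used), pushing children in reverse so the recursion's emission order is preserved.
-- outside the precondition, e.g. on find_edge_combinations([(1, 1)]): A raises KeyError, B returns [[(1, 1)]]
-- crash fix: On any input containing a self-loop edge (u, u), A raises KeyError (it calls used.remove(u) twice after selecting that edge), while B, which never mutates a shared set, returns the matchings normally. — e.g. on find_edge_combinations([(1, 1)]): A raises KeyError, B returns [[(1, 1)]]
import Mathlib
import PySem

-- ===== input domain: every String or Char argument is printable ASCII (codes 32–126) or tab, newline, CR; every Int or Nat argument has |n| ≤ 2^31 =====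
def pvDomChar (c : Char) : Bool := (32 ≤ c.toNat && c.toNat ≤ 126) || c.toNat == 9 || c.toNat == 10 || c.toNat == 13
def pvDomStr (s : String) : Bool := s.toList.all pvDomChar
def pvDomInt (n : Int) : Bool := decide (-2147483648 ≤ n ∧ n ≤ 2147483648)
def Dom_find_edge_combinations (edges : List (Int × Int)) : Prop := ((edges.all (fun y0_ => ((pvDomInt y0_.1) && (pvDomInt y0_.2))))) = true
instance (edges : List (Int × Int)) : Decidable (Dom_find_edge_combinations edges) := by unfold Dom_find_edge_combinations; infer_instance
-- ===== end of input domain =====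

-- B replaces A's mutating recursive backtracking by an explicit stack-based iterative DFS with
-- immutable per-frame state (objective: alternative decomposition, same asymptotic cost).
-- Equivalence is about the RETURN value; neither version mutates its argument.

-- ===== PORT A =====
-- A's inner `backtrack` (the part after the start>=len test is its for-loop, ported as pvLpA).
-- `used` is the Python set, `cur_combo` the list; mutation + undo becomes passing the extended
-- set/list into the recursive call (the undo restores exactly the caller's values).
mutual
def pvBtA (edges : List (Int × Int)) (start : Nat) (combo : List (Int × Int)) (used : PySem.Set Int) : List (List (Int × Int)) :=
  if _h : edges.length ≤ start then [combo]
  else pvLpA edges start combo used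
termination_by (2 * (edges.length - start) + 1)

def pvLpA (edges : List (Int × Int)) (i : Nat) (combo : List (Int × Int)) (used : PySem.Set Int) : List (List (Int × Int)) :=
  if h : edges.length ≤ i then []
  else
    let e := edges[i]'(by omega)
    if ¬ (PySem.Set.contains used e.1 = true) ∧ ¬ (PySem.Set.contains used e.2 = true) then
      pvBtA edges (i + 1) (combo ++ [e]) ((PySem.Set.add used e.1).add e.2)
        ++ pvLpA edges (i + 1) combo used
    else pvLpA edges (i + 1) combo used
termination_by (2 * (edges.length - i))
end

def find_edge_combinations (edges : List (Int × Int)) : List (List (Int × Int)) :=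
  pvBtA edges 0 [] PySem.Set.empty

-- ===== PORT B =====
-- A frame is (start, combo, used), exactly Source B's tuples.
-- Source B's children comprehension over range(start, n); `used | {u, v}` adds u then v (exact:
-- union with the two-element set literal appends the missing elements in that order).
def pvChildrenB (edges : List (Int × Int)) (start : Nat) (combo : List (Int × Int)) (used : PySem.Set Int) :
    List (Nat × List (Int × Int) × PySem.Set Int) :=
  (List.range' start (edges.length - start)).filterMap fun i =>
    match edges[i]? with
    | some e =>
      if ¬ (PySem.Set.contains used e.1 = true) ∧ ¬ (PySem.Set.contains used e.2 = true) then
        some (i + 1, combo ++ [e], (PySem.Set.add used e.1).add e.2)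
      else none
    | none => none

-- total weight of a stack, used only to justify termination of the while loop
def pvW (edges : List (Int × Int)) (stack : List (Nat × List (Int × Int) × PySem.Set Int)) : Nat :=
  (stack.map fun fr => 2 ^ (edges.length - fr.1)).sum

theorem pvW_filterMap_le (edges : List (Int × Int))
    (f : Nat → Option (Nat × List (Int × Int) × PySem.Set Int))
    (hf : ∀ x fr, f x = some fr → fr.1 = x + 1) :
    ∀ (len i : Nat), edges.length ≤ i + len →
      pvW edges ((List.range' i len).filterMap f) ≤ 2 ^ len - 1 := by
  intro len
  induction len with
  | zero => intro i _; simp [pvW]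
  | succ k ih =>
    intro i hle
    rw [List.range'_succ, List.filterMap_cons]
    have hk := ih (i + 1) (by omega)
    have h1 : (1:Nat) ≤ 2 ^ k := Nat.one_le_two_pow
    cases hfi : f i with
    | none =>
      refine le_trans hk ?_
      have : (2:Nat) ^ k ≤ 2 ^ (k + 1) := Nat.pow_le_pow_right (by omega) (by omega)
      omega
    | some fr =>
      have hfr : fr.1 = i + 1 := hf i fr hfi
      simp only [pvW, List.map_cons, List.sum_cons, hfr]
      have hpow : 2 ^ (edges.length - (i + 1)) ≤ 2 ^ k :=
        Nat.pow_le_pow_right (by omega) (by omega)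
      have hk' : (((List.range' (i + 1) k).filterMap f).map
          fun fr => 2 ^ (edges.length - fr.1)).sum ≤ 2 ^ k - 1 := hk
      simp only [pow_succ]
      omega

theorem pvW_childrenB_lt (edges : List (Int × Int)) (start : Nat) (combo : List (Int × Int))
    (used : PySem.Set Int) :
    pvW edges (pvChildrenB edges start combo used) < 2 ^ (edges.length - start) := by
  have h := pvW_filterMap_le edges
    (fun i =>
      match edges[i]? with
      | some e =>
        if ¬ (PySem.Set.contains used e.1 = true) ∧ ¬ (PySem.Set.contains used e.2 = true) then
          some (i + 1, combo ++ [e], (PySem.Set.add used e.1).add e.2)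
        else none
      | none => none)
    (by
      intro x fr hx
      cases hg : edges[x]? with
      | none => simp [hg] at hx
      | some e =>
        simp only [hg] at hx
        split_ifs at hx
        simp only [Option.some.injEq] at hx
        rw [← hx])
    (edges.length - start) start (by omega)
  have h1 : (1:Nat) ≤ 2 ^ (edges.length - start) := Nat.one_le_two_pow
  unfold pvChildrenB
  omega

-- Source B's while loop; the stack is kept top-first (Python pops from the end and extends with
-- reversed(children), so the next frame popped is children[0]: top-first that is children ++ rest).
def pvRunB (edges : List (Int × Int)) (stack : List (Nat × List (Int × Int) × PySem.Set Int)) :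
    List (List (Int × Int)) :=
  match stack with
  | [] => []
  | (start, combo, used) :: rest =>
    if _h : edges.length ≤ start then combo :: pvRunB edges rest
    else pvRunB edges (pvChildrenB edges start combo used ++ rest)
termination_by pvW edges stack
decreasing_by
  · simp only [pvW, List.map_cons, List.sum_cons]
    have h1 : (1:Nat) ≤ 2 ^ (edges.length - start) := Nat.one_le_two_pow
    omega
  · simp only [pvW, List.map_cons, List.sum_cons, List.map_append, List.sum_append]
    have := pvW_childrenB_lt edges start combo used
    simp only [pvW] at this
    omega

def find_edge_combinations_alt (edges : List (Int × Int)) : List (List (Int × Int)) :=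
  pvRunB edges [(0, [], PySem.Set.empty)]

-- ===== PRECONDITION & SPEC =====
-- Pre_ excludes inputs containing a self-loop edge (u, u): there Python A raises KeyError
-- (used.remove(u) is executed twice after such an edge is selected).
def Pre_find_edge_combinations (edges : List (Int × Int)) : Prop :=
  ∀ e ∈ edges, e.1 ≠ e.2
instance (edges : List (Int × Int)) : Decidable (Pre_find_edge_combinations edges) := by
  unfold Pre_find_edge_combinations; infer_instance

def pvWitness_find_edge_combinations : (List (Int × Int)) := [(1, 2), (1, 3)]

-- On any input containing a self-loop edge (u, u), A raises KeyError while B returns the matchings normally.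
def Raises_find_edge_combinations (edges : List (Int × Int)) : Prop :=
  ∃ e ∈ edges, e.1 = e.2
instance (edges : List (Int × Int)) : Decidable (Raises_find_edge_combinations edges) := by
  unfold Raises_find_edge_combinations; infer_instance

def pvRaiseWitness_find_edge_combinations : (List (Int × Int)) := [(1, 1)]
def pvRaiseWitnessOut_find_edge_combinations : List (List (Int × Int)) := [[(1, 1)]]

def Spec_find_edge_combinations (edges : List (Int × Int)) (out : List (List (Int × Int))) : Prop := out = find_edge_combinations_alt edges
instance (edges : List (Int × Int)) (out : List (List (Int × Int))) : Decidable (Spec_find_edge_combinations edges out) := by unfold Spec_find_edge_combinations; infer_instance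

-- ===== CLAIM (what is proved, stated in full; the proofs are below) =====
def Claim_equal_find_edge_combinations : Prop := ∀ (edges : List (Int × Int)), Dom_find_edge_combinations edges → Pre_find_edge_combinations edges → Spec_find_edge_combinations edges (find_edge_combinations edges)

def Claim_raises_find_edge_combinations : Prop := (∀ (edges : List (Int × Int)), Dom_find_edge_combinations edges → Raises_find_edge_combinations edges → ¬ Pre_find_edge_combinations edges) ∧ (Dom_find_edge_combinations (pvRaiseWitness_find_edge_combinations) ∧ Raises_find_edge_combinations (pvRaiseWitness_find_edge_combinations) ∧ find_edge_combinations_alt (pvRaiseWitness_find_edge_combinations) = pvRaiseWitnessOut_find_edge_combinations)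

-- ===== LEMMAS AND PROOFS =====

-- the child-generating function of one frame, named for the proofs
def pvChildF (edges : List (Int × Int)) (combo : List (Int × Int)) (used : PySem.Set Int) :
    Nat → Option (Nat × List (Int × Int) × PySem.Set Int) := fun i =>
  match edges[i]? with
  | some e =>
    if ¬ (PySem.Set.contains used e.1 = true) ∧ ¬ (PySem.Set.contains used e.2 = true) then
      some (i + 1, combo ++ [e], (PySem.Set.add used e.1).add e.2)
    else none
  | none => none

theorem pvChildrenB_eq (edges combo : List (Int × Int)) (start : Nat) (used : PySem.Set Int) :
    pvChildrenB edges start combo used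
      = (List.range' start (edges.length - start)).filterMap (pvChildF edges combo used) := rfl

theorem pvBtA_base (edges : List (Int × Int)) (start : Nat) (combo : List (Int × Int))
    (used : PySem.Set Int) (h : edges.length ≤ start) : pvBtA edges start combo used = [combo] := by
  unfold pvBtA; simp [h]

theorem pvBtA_step (edges : List (Int × Int)) (start : Nat) (combo : List (Int × Int))
    (used : PySem.Set Int) (h : ¬ edges.length ≤ start) :
    pvBtA edges start combo used = pvLpA edges start combo used := by
  unfold pvBtA; simp [h]

-- expanding one frame's children and flattening their DFS results gives exactly A's for-loop
theorem pvChildrenB_flatMap (edges : List (Int × Int)) :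
    ∀ (len i : Nat), edges.length = i + len → ∀ (combo : List (Int × Int)) (used : PySem.Set Int),
      ((pvChildrenB edges i combo used).flatMap fun fr => pvBtA edges fr.1 fr.2.1 fr.2.2)
        = pvLpA edges i combo used := by
  intro len
  induction len with
  | zero =>
    intro i hlen combo used
    rw [pvChildrenB_eq]
    unfold pvLpA
    simp [show edges.length - i = 0 by omega, show edges.length ≤ i by omega]
  | succ k ih =>
    intro i hlen combo used
    have hi : i < edges.length := by omega
    have hg : edges[i]? = some (edges[i]'hi) := List.getElem?_eq_getElem hi
    rw [pvChildrenB_eq, show edges.length - i = k + 1 by omega, List.range'_succ,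
        List.filterMap_cons]
    have htail : (List.range' (i + 1) k).filterMap (pvChildF edges combo used)
        = pvChildrenB edges (i + 1) combo used := by
      rw [pvChildrenB_eq, show edges.length - (i + 1) = k by omega]
    conv_rhs => unfold pvLpA
    simp only [dif_neg (show ¬ edges.length ≤ i by omega)]
    by_cases hc : ¬ (PySem.Set.contains used (edges[i]'hi).1 = true) ∧
        ¬ (PySem.Set.contains used (edges[i]'hi).2 = true)
    · have hhead : pvChildF edges combo used i
          = some (i + 1, combo ++ [edges[i]'hi], (PySem.Set.add used (edges[i]'hi).1).add (edges[i]'hi).2) := by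
        unfold pvChildF; rw [hg]; exact if_pos hc
      rw [hhead, htail, List.flatMap_cons, ih (i + 1) (by omega) combo used, if_pos hc]
    · have hhead : pvChildF edges combo used i = none := by
        unfold pvChildF; rw [hg]; exact if_neg hc
      rw [hhead, htail, ih (i + 1) (by omega) combo used, if_neg hc]

-- the while loop computes the concatenation of the recursive DFS results of its frames
theorem pvRunB_flatMap (edges : List (Int × Int)) :
    ∀ (stack : List (Nat × List (Int × Int) × PySem.Set Int)),
      pvRunB edges stack = stack.flatMap fun fr => pvBtA edges fr.1 fr.2.1 fr.2.2 := by
  intro stack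
  induction stack using pvRunB.induct edges with
  | case1 => simp [pvRunB]
  | case2 start combo used rest h ih =>
    unfold pvRunB
    rw [dif_pos h, ih, List.flatMap_cons, pvBtA_base edges start combo used h]
    rfl
  | case3 start combo used rest h ih =>
    unfold pvRunB
    rw [dif_neg h, ih, List.flatMap_append, List.flatMap_cons,
        pvChildrenB_flatMap edges (edges.length - start) start (by omega) combo used,
        pvBtA_step edges start combo used h]

-- ===== VERDICT (by name: the statement is the Claim_ definition above) =====
theorem find_edge_combinations_spec : Claim_equal_find_edge_combinations := by
  intro edges _ _
  unfold Spec_find_edge_combinations find_edge_combinations find_edge_combinations_alt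
  rw [pvRunB_flatMap]
  simp

theorem find_edge_combinations_raises : Claim_raises_find_edge_combinations := by
  unfold Claim_raises_find_edge_combinations
  refine ⟨?_, by decide, ⟨(1, 1), by decide⟩, ?_⟩
  · intro edges _ ⟨e, he, heq⟩ hpre
    exact hpre e he heq
  · show find_edge_combinations_alt [(1, 1)] = [[(1, 1)]]
    unfold find_edge_combinations_alt
    rw [pvRunB_flatMap]
    simp only [List.flatMap_cons, List.flatMap_nil, List.append_nil]
    rw [pvBtA_step _ _ _ _ (by decide)]
    unfold pvLpA
    norm_num [PySem.Set.contains, PySem.Set.empty, PySem.Set.add]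
    rw [pvBtA_base _ _ _ _ (by decide)]
    have h2 : pvLpA [(1, 1)] 1 [] ([] : PySem.Set Int) = [] := by
      unfold pvLpA; simp
    rw [h2, List.append_nil]

-- self-check: the witness value asserted by the raises claim, extracted for direct reference
theorem pvRaiseWitness_value_ok :
    find_edge_combinations_alt pvRaiseWitness_find_edge_combinations
      = pvRaiseWitnessOut_find_edge_combinations :=
  find_edge_combinations_raises.2.2.2
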